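-- pv_equiv track=rewrite | github.com/Jakub-Woszczek/Algorithms-and-Data-Structures-AGH-CS-Course- | Moje kolosy/Kolos 3 ASD/6. Kuba's idea DZIAŁA.py | orchard
-- ===== SOURCE A (Python) =====
-- def orchard(T, m):
--     def find_unique_in_sorted(sorted_array, m):
--         if not sorted_array:
--             return []
--
--         unique_elements = [sorted_array[0]]
--
--         for i in range(1, len(sorted_array)):
--             reszta = sorted_array[i] % m
--             if reszta != 0:
--                 unique_elements.append(reszta)
--
--         return unique_elements
--
--     T.sort()
--     T = find_unique_in_sorted(T, m)
--     all_fruits = sum(T)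
--     all_trees = len(T)
--
--
--     DQ = [[all_trees for _ in range(all_trees + 1)] for _ in range(m)]
--
--     DQ[0][0] = 0
--
--     for cols in range(0, all_trees):
--         for rows in range(0, m):
--
--             if DQ[rows][cols] != None:
--                 DQ[rows][cols + 1] = DQ[rows][cols] + 1 if DQ[rows][cols + 1] > DQ[rows][cols] else DQ[rows][cols + 1]
--
--                 DQ[(rows + T[cols])%m][cols+1] = DQ[rows][cols] if DQ[(rows + T[cols])%m][cols+1] > DQ[rows][cols] else DQ[(rows + T[cols])%m][cols+1]
--
--     return DQ[0][all_trees]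
-- ===== SOURCE B (Python) =====
-- def orchard(T, m):
--     # Top-down memoized recursion over (tree index, residue), demand-driven from (0, 0),
--     # instead of the bottom-up 2-D table. Same preprocessing; like A, sorts T in place.
--     def find_unique_in_sorted(sorted_array, m):
--         if not sorted_array:
--             return []
--
--         unique_elements = [sorted_array[0]]
--
--         for i in range(1, len(sorted_array)):
--             reszta = sorted_array[i] % m
--             if reszta != 0:
--                 unique_elements.append(reszta)
--
--         return unique_elements
--
--     T.sort()
--     T = find_unique_in_sorted(T, m)
--     all_trees = len(T)
--
--     memo = {}
--     get = memo.get
--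
--     def f(i, r):
--         # minimum number of non-selected trees among trees i..end so that the
--         # running residue r ends at 0 (all_trees if no completion reaches 0);
--         # memoized on i * m + r (r is always in [0, m))
--         if i == all_trees:
--             return 0 if r == 0 else all_trees
--         key = i * m + r
--         res = get(key)
--         if res is None:
--             skip = 1 + f(i + 1, r)          # do not select tree i
--             take = f(i + 1, (r + T[i]) % m)  # select tree i
--             res = skip if skip < take else take
--             memo[key] = res
--         return res
--
--     return f(0, 0)
-- ===== Notes on version B (the rewrite author's own statement) =====
-- stated objective: alternative
-- what changed: The bottom-up 2-D table DQ filled by a column-by-row double loop of conditional scatter writes is replaced by a top-down memoized recursion f(i, r) over (tree index, residue) started at f(0, 0), which evaluates the same recurrence backwards over the suffix and only on states reachable from (0, 0); preprocessing is unchanged.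
import Mathlib
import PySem

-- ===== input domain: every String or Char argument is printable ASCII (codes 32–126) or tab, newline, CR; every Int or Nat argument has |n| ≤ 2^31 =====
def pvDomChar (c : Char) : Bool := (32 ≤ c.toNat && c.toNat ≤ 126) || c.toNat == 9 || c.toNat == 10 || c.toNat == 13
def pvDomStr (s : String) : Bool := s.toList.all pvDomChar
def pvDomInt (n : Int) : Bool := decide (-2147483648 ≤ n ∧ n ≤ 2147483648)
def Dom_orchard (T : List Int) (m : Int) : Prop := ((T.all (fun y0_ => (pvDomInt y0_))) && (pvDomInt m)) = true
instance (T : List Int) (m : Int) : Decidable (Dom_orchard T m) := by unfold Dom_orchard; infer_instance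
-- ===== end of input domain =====

-- B replaces A's bottom-up 2-D DP table with a top-down memoized recursion over
-- (tree index, residue) evaluated backwards from the suffix; same preprocessing.
-- Both sort the Python argument in place; the equivalence proved here is about the return value.


-- ===== PORT A =====
-- DQ[r][c] read/write helpers (Python DQ[rows][cols]); Python lists index in O(1), so the
-- nested list is ported as Array (same values, insertion order); all indices used are
-- nonnegative and in range under Pre_ (m >= 1), so negative-index wrap and IndexError are
-- unreachable (out-of-range access yields a default that is never used).
def avGet2 (DQ : Array (Array Int)) (r c : Nat) : Int := (DQ[r]?.getD #[])[c]?.getD 0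
def avSet2 (DQ : Array (Array Int)) (r c : Nat) (v : Int) : Array (Array Int) :=
  DQ.modify r (fun row => row.setIfInBounds c v)

-- inner def find_unique_in_sorted of A
def findUniqueA (sorted_array : List Int) (m : Int) : List Int :=
  if sorted_array = [] then []
  else
    (PySem.List.pyRange 1 (PySem.List.len sorted_array) 1).foldl
      (fun unique_elements i =>
        let reszta := PySem.Int.mod (PySem.List.pyGetD sorted_array i 0) m
        if reszta ≠ 0 then unique_elements ++ [reszta] else unique_elements)
      [PySem.List.pyGetD sorted_array 0 0]

def orchard (T : List Int) (m : Int) : Int :=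
  let T := PySem.List.sorted T (fun x => x)
  let T := findUniqueA T m
  let _all_fruits : Int := T.sum            -- all_fruits = sum(T) (unused by A)
  let all_trees : Int := PySem.List.len T
  let n : Nat := T.length                   -- all_trees as a Nat (range/list sizes)
  let DQ : Array (Array Int) := Array.replicate m.toNat (Array.replicate (n + 1) all_trees)
  let DQ := avSet2 DQ 0 0 0
  -- for cols in range(0, all_trees): for rows in range(0, m):   (m < 0 gives the empty range, as range(m) does)
  let DQ := (List.range n).foldl (fun DQ cols =>
      (List.range m.toNat).foldl (fun DQ rows =>
        -- 'if DQ[rows][cols] != None:' is always true in Python (the body always runs)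
        let v := avGet2 DQ rows cols
        let DQ := if avGet2 DQ rows (cols + 1) > v + 1 then avSet2 DQ rows (cols + 1) (v + 1) else DQ
        let tgt := (PySem.Int.mod ((rows : Int) + PySem.List.pyGetD T (cols : Int) 0) m).toNat
        if avGet2 DQ tgt (cols + 1) > v then avSet2 DQ tgt (cols + 1) v else DQ) DQ) DQ
  avGet2 DQ 0 n

-- ===== PORT B =====
-- B-side copy of the (identical) preprocessing helper
def findUniqueB (sorted_array : List Int) (m : Int) : List Int :=
  if sorted_array = [] then []
  else
    (PySem.List.pyRange 1 (PySem.List.len sorted_array) 1).foldl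
      (fun unique_elements i =>
        let reszta := PySem.Int.mod (PySem.List.pyGetD sorted_array i 0) m
        if reszta ≠ 0 then unique_elements ++ [reszta] else unique_elements)
      [PySem.List.pyGetD sorted_array 0 0]

-- Source B's inner 'def f(i, r)': recursion over the suffix of trees from index i (here the
-- suffix list itself, structural recursion) with running residue r; the Python memo dict is
-- a cache of this pure function's values, so the port computes the same recurrence directly.
def fB (m all_trees : Int) : List Int → Int → Int
  | [], r => if r = 0 then 0 else all_trees
  | t :: ts, r => min (1 + fB m all_trees ts r) (fB m all_trees ts (PySem.Int.mod (r + t) m))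

def orchard_alt (T : List Int) (m : Int) : Int :=
  let T := PySem.List.sorted T (fun x => x)
  let T := findUniqueB T m
  let all_trees : Int := PySem.List.len T
  fB m all_trees T 0                        -- return f(0, 0)

-- ===== PRECONDITION & SPEC =====
-- Pre_ excludes exactly the inputs where A raises: for m ≤ 0 the DQ table has no rows (or, for
-- m = 0 and len(T) ≥ 2, '% m' divides by zero), so A raises IndexError/ZeroDivisionError.
def Pre_orchard (T : List Int) (m : Int) : Prop := 1 ≤ m
instance (T : List Int) (m : Int) : Decidable (Pre_orchard T m) := by unfold Pre_orchard; infer_instance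
def pvWitness_orchard : List Int × Int := ([5, 3, 4], 4)

def Spec_orchard (T : List Int) (m : Int) (out : Int) : Prop := out = orchard_alt T m
instance (T : List Int) (m : Int) (out : Int) : Decidable (Spec_orchard T m out) := by unfold Spec_orchard; infer_instance

-- ===== CLAIM (what is proved, stated in full; the proofs are below) =====
def Claim_equal_orchard : Prop := ∀ (T : List Int) (m : Int), Dom_orchard T m → Pre_orchard T m → Spec_orchard T m (orchard T m)

-- ===== LEMMAS AND PROOFS =====

-- list-level mirrors of the array table operations (the invariant proofs live on lists)
def pvGet2 (DQ : List (List Int)) (r c : Nat) : Int := ((DQ[r]?).getD []).getD c 0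
def pvSet2 (DQ : List (List Int)) (r c : Nat) (v : Int) : List (List Int) :=
  DQ.set r (((DQ[r]?).getD []).set c v)

-- shape of the DP table: M rows, each of length n+1
def pvShape (M n : Nat) (D : List (List Int)) : Prop :=
  D.length = M ∧ ∀ r, r < M → ((D[r]?).getD []).length = n + 1

theorem pvGet2_pvSet2 (DQ : List (List Int)) (r' c' : Nat) (v : Int) (r c : Nat)
    (hr : r' < DQ.length) (hc : c' < ((DQ[r']?).getD []).length) :
    pvGet2 (pvSet2 DQ r' c' v) r c = if r = r' ∧ c = c' then v else pvGet2 DQ r c := by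
  unfold pvGet2 pvSet2
  simp only [List.getD_eq_getElem?_getD, List.getElem?_set]
  by_cases h1 : r' = r
  · subst h1
    simp only [hr, if_pos, Option.getD_some, List.getElem?_set]
    by_cases h2 : c' = c
    · subst h2
      simp [hc]
    · simp [h2, Ne.symm h2]
  · have : ¬ (r = r' ∧ c = c') := fun h => h1 h.1.symm
    simp [h1, this]

theorem pvGet2_condSet (DQ : List (List Int)) (r' c' : Nat) (w : Int) (r c : Nat)
    (hr : r' < DQ.length) (hc : c' < ((DQ[r']?).getD []).length) :
    pvGet2 (if pvGet2 DQ r' c' > w then pvSet2 DQ r' c' w else DQ) r c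
      = if r = r' ∧ c = c' then min (pvGet2 DQ r' c') w else pvGet2 DQ r c := by
  by_cases h : pvGet2 DQ r' c' > w
  · rw [if_pos h, pvGet2_pvSet2 DQ r' c' w r c hr hc]
    by_cases h2 : r = r' ∧ c = c'
    · rw [if_pos h2, if_pos h2]; omega
    · rw [if_neg h2, if_neg h2]
  · rw [if_neg h]
    by_cases h2 : r = r' ∧ c = c'
    · obtain ⟨rfl, rfl⟩ := h2
      rw [if_pos ⟨rfl, rfl⟩]; omega
    · rw [if_neg h2]

theorem pvShape_pvSet2 {M n : Nat} {D : List (List Int)} (h : pvShape M n D)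
    (r' c' : Nat) (v : Int) (hr : r' < M) :
    pvShape M n (pvSet2 D r' c' v) := by
  obtain ⟨hl, hrow⟩ := h
  refine ⟨by simpa [pvSet2] using hl, ?_⟩
  intro r hrM
  simp only [pvSet2, List.getElem?_set]
  by_cases h1 : r' = r
  · subst h1
    have hq : (D[r']?).getD [] = D[r'] := by
      rw [List.getElem?_eq_getElem (by omega)]; rfl
    have := hrow r' hrM
    rw [hq] at this
    simp [hl ▸ hr, List.length_set, this]
  · simp [h1, hrow r hrM]

theorem pvShape_condSet {M n : Nat} {D : List (List Int)} (h : pvShape M n D)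
    (r' c' : Nat) (w : Int) (hr : r' < M) :
    pvShape M n (if pvGet2 D r' c' > w then pvSet2 D r' c' w else D) := by
  split_ifs with hh
  · exact pvShape_pvSet2 h r' c' w hr
  · exact h

theorem pv_mod_iff (m r j t : Int) (hr : 0 ≤ r) (hr2 : r < m) (hj : 0 ≤ j) (hj2 : j < m) :
    (r - t) % m = j ↔ (j + t) % m = r := by
  constructor
  · intro h
    rw [← h, Int.emod_add_emod]
    simp [Int.emod_eq_of_lt hr hr2]
  · intro h
    rw [← h, Int.sub_emod, Int.emod_emod_of_dvd _ dvd_rfl, ← Int.sub_emod]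
    simp [Int.emod_eq_of_lt hj hj2]

theorem pv_p_lt (m a : Int) (hm : 1 ≤ m) : (PySem.Int.mod a m).toNat < m.toNat := by
  have h1 := PySem.Int.mod_nonneg a (b := m) (by omega)
  have h2 := PySem.Int.mod_lt a (b := m) (by omega)
  omega

theorem pv_p_iff (m : Int) (hm : 1 ≤ m) (t : Int) (r j : Nat)
    (hr : r < m.toNat) (hj : j < m.toNat) :
    (PySem.Int.mod ((r : Int) - t) m).toNat = j ↔ (PySem.Int.mod ((j : Int) + t) m).toNat = r := by
  have hmpos : (0 : Int) < m := by omega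
  have e1 : PySem.Int.mod ((r : Int) - t) m = ((r : Int) - t) % m :=
    PySem.Int.mod_eq_emod_of_pos hmpos
  have e2 : PySem.Int.mod ((j : Int) + t) m = ((j : Int) + t) % m :=
    PySem.Int.mod_eq_emod_of_pos hmpos
  have n1 := PySem.Int.mod_nonneg ((r : Int) - t) (b := m) (by omega)
  have n2 := PySem.Int.mod_nonneg ((j : Int) + t) (b := m) (by omega)
  have key := pv_mod_iff m (r : Int) (j : Int) t (by omega) (by exact_mod_cast (by omega : (r : Int) < (m.toNat : Int)).trans_le (by omega)) (by omega) (by omega)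
  rw [e1] at n1
  rw [e2] at n2
  rw [e1, e2]
  omega


theorem pv_getD_map_range (M : Nat) (f : Nat → Int) (r : Nat) (h : r < M) :
    (((List.range M).map f).getD r 0) = f r := by
  simp [List.getD, h]

theorem pv_shape_init (M n : Nat) (x : Int) :
    pvShape M n (List.replicate M (List.replicate (n + 1) x)) :=
  ⟨by simp, fun r hr => by simp [hr]⟩

theorem pv_get2_replicate (M n : Nat) (x : Int) (r c : Nat) (hr : r < M) (hc : c < n + 1) :
    pvGet2 (List.replicate M (List.replicate (n + 1) x)) r c = x := by
  simp [pvGet2, List.getD, hr, hc]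

theorem pv_c0_getD (M n : Nat) (hM : 0 < M) (r : Nat) (hr : r < M) :
    ((List.replicate M ((n : Int))).set 0 0).getD r 0 = if r = 0 then 0 else (n : Int) := by
  by_cases h : r = 0
  · subst h; simp [List.getD, hM]
  · simp [List.getD, Ne.symm h, hr, h]

-- two conditional relaxation writes into column k+1, fully described
theorem pv_two_sets (F : List (List Int)) (M n k : Nat) (hsh : pvShape M n F) (hk : k < n)
    (j q : Nat) (hj : j < M) (hq : q < M) (w1 w2 : Int) :
    pvShape M n (if pvGet2 (if pvGet2 F j (k + 1) > w1 then pvSet2 F j (k + 1) w1 else F) q (k + 1) > w2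
        then pvSet2 (if pvGet2 F j (k + 1) > w1 then pvSet2 F j (k + 1) w1 else F) q (k + 1) w2
        else (if pvGet2 F j (k + 1) > w1 then pvSet2 F j (k + 1) w1 else F)) ∧
    (∀ r c, c ≠ k + 1 → pvGet2 (if pvGet2 (if pvGet2 F j (k + 1) > w1 then pvSet2 F j (k + 1) w1 else F) q (k + 1) > w2
        then pvSet2 (if pvGet2 F j (k + 1) > w1 then pvSet2 F j (k + 1) w1 else F) q (k + 1) w2
        else (if pvGet2 F j (k + 1) > w1 then pvSet2 F j (k + 1) w1 else F)) r c = pvGet2 F r c) ∧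
    (∀ r, pvGet2 (if pvGet2 (if pvGet2 F j (k + 1) > w1 then pvSet2 F j (k + 1) w1 else F) q (k + 1) > w2
        then pvSet2 (if pvGet2 F j (k + 1) > w1 then pvSet2 F j (k + 1) w1 else F) q (k + 1) w2
        else (if pvGet2 F j (k + 1) > w1 then pvSet2 F j (k + 1) w1 else F)) r (k + 1)
      = (if r = q then min (if r = j then min (pvGet2 F j (k + 1)) w1 else pvGet2 F r (k + 1)) w2
         else (if r = j then min (pvGet2 F j (k + 1)) w1 else pvGet2 F r (k + 1)))) := by
  have hs1 : pvShape M n (if pvGet2 F j (k + 1) > w1 then pvSet2 F j (k + 1) w1 else F) :=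
    pvShape_condSet hsh j (k + 1) w1 hj
  have g1 : ∀ r c, pvGet2 (if pvGet2 F j (k + 1) > w1 then pvSet2 F j (k + 1) w1 else F) r c
      = if r = j ∧ c = k + 1 then min (pvGet2 F j (k + 1)) w1 else pvGet2 F r c :=
    fun r c => pvGet2_condSet F j (k + 1) w1 r c (hsh.1 ▸ hj) (by rw [hsh.2 j hj]; omega)
  have g2 : ∀ r c, pvGet2 (if pvGet2 (if pvGet2 F j (k + 1) > w1 then pvSet2 F j (k + 1) w1 else F) q (k + 1) > w2
      then pvSet2 (if pvGet2 F j (k + 1) > w1 then pvSet2 F j (k + 1) w1 else F) q (k + 1) w2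
      else (if pvGet2 F j (k + 1) > w1 then pvSet2 F j (k + 1) w1 else F)) r c
      = if r = q ∧ c = k + 1
        then min (pvGet2 (if pvGet2 F j (k + 1) > w1 then pvSet2 F j (k + 1) w1 else F) q (k + 1)) w2
        else pvGet2 (if pvGet2 F j (k + 1) > w1 then pvSet2 F j (k + 1) w1 else F) r c :=
    fun r c => pvGet2_condSet _ q (k + 1) w2 r c (hs1.1 ▸ hq) (by rw [hs1.2 q hq]; omega)
  refine ⟨pvShape_condSet hs1 q (k + 1) w2 hq, ?_, ?_⟩
  · intro r c hc
    rw [g2 r c, if_neg (show ¬(r = q ∧ c = k + 1) from fun h => hc h.2),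
      g1 r c, if_neg (show ¬(r = j ∧ c = k + 1) from fun h => hc h.2)]
  · intro r
    rw [g2 r (k + 1), g1 r (k + 1), g1 q (k + 1)]
    by_cases h1 : r = q
    · subst h1
      simp
    · simp [h1]

-- one relaxation step against the gather formula, on abstract values
theorem pv_leaf (r j tgt pj pr : Nat) (nn vr vj vpj vpr : Int)
    (hiff : pr = j ↔ tgt = r)
    (hrj : r = j → (vr = vj ∧ pr = pj ∧ vpr = vpj))
    (hpj_vj : pr = j → vpr = vj) :
    (if r = tgt then
       min (if r = j
            then min (min nn (min (if j < j then vj + 1 else nn) (if pj < j then vpj else nn))) (vj + 1)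
            else (min nn (min (if r < j then vr + 1 else nn) (if pr < j then vpr else nn)))) vj
     else (if r = j
           then min (min nn (min (if j < j then vj + 1 else nn) (if pj < j then vpj else nn))) (vj + 1)
           else (min nn (min (if r < j then vr + 1 else nn) (if pr < j then vpr else nn)))))
    = min nn (min (if r < j + 1 then vr + 1 else nn) (if pr < j + 1 then vpr else nn)) := by
  split_ifs <;> omega

-- the inner row loop of A, analysed after j of the M iterations
theorem pv_inner_spec (m : Int) (hm : 1 ≤ m) (U : List Int) (n k : Nat) (hk : k < n)
    (D : List (List Int)) (v : Nat → Int)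
    (hshape : pvShape m.toNat n D)
    (hcolk : ∀ r, r < m.toNat → pvGet2 D r k = v r)
    (hfresh : ∀ r, r < m.toNat → pvGet2 D r (k + 1) = (n : Int))
    (j : Nat) (hj : j ≤ m.toNat) :
    pvShape m.toNat n ((List.range j).foldl (fun DQ rows =>
        let v := pvGet2 DQ rows k
        let DQ := if pvGet2 DQ rows (k + 1) > v + 1 then pvSet2 DQ rows (k + 1) (v + 1) else DQ
        let tgt := (PySem.Int.mod ((rows : Int) + PySem.List.pyGetD U (k : Int) 0) m).toNat
        if pvGet2 DQ tgt (k + 1) > v then pvSet2 DQ tgt (k + 1) v else DQ) D) ∧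
    (∀ r c, c ≠ k + 1 → pvGet2 ((List.range j).foldl (fun DQ rows =>
        let v := pvGet2 DQ rows k
        let DQ := if pvGet2 DQ rows (k + 1) > v + 1 then pvSet2 DQ rows (k + 1) (v + 1) else DQ
        let tgt := (PySem.Int.mod ((rows : Int) + PySem.List.pyGetD U (k : Int) 0) m).toNat
        if pvGet2 DQ tgt (k + 1) > v then pvSet2 DQ tgt (k + 1) v else DQ) D) r c = pvGet2 D r c) ∧
    (∀ r, r < m.toNat → pvGet2 ((List.range j).foldl (fun DQ rows =>
        let v := pvGet2 DQ rows k
        let DQ := if pvGet2 DQ rows (k + 1) > v + 1 then pvSet2 DQ rows (k + 1) (v + 1) else DQ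
        let tgt := (PySem.Int.mod ((rows : Int) + PySem.List.pyGetD U (k : Int) 0) m).toNat
        if pvGet2 DQ tgt (k + 1) > v then pvSet2 DQ tgt (k + 1) v else DQ) D) r (k + 1)
      = min (n : Int) (min
          (if r < j then v r + 1 else (n : Int))
          (if (PySem.Int.mod ((r : Int) - PySem.List.pyGetD U (k : Int) 0) m).toNat < j
             then v (PySem.Int.mod ((r : Int) - PySem.List.pyGetD U (k : Int) 0) m).toNat
             else (n : Int)))) := by
  induction j with
  | zero =>
    refine ⟨hshape, fun r c _ => rfl, fun r hr => ?_⟩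
    simp only [List.range_zero, List.foldl_nil, Nat.not_lt_zero, if_false]
    rw [hfresh r hr]
    omega
  | succ j ih =>
    have hj' : j < m.toNat := by omega
    obtain ⟨ihs, ihu, ihv⟩ := ih (by omega)
    rw [List.range_succ, List.foldl_append, List.foldl_cons, List.foldl_nil]
    dsimp only
    obtain ⟨s2, u2, w2⟩ := pv_two_sets
      ((List.range j).foldl (fun DQ rows =>
        let v := pvGet2 DQ rows k
        let DQ := if pvGet2 DQ rows (k + 1) > v + 1 then pvSet2 DQ rows (k + 1) (v + 1) else DQ
        let tgt := (PySem.Int.mod ((rows : Int) + PySem.List.pyGetD U (k : Int) 0) m).toNat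
        if pvGet2 DQ tgt (k + 1) > v then pvSet2 DQ tgt (k + 1) v else DQ) D)
      m.toNat n k ihs hk j
      ((PySem.Int.mod ((j : Int) + PySem.List.pyGetD U (k : Int) 0) m).toNat) hj'
      (pv_p_lt m _ hm)
      (pvGet2 ((List.range j).foldl (fun DQ rows =>
        let v := pvGet2 DQ rows k
        let DQ := if pvGet2 DQ rows (k + 1) > v + 1 then pvSet2 DQ rows (k + 1) (v + 1) else DQ
        let tgt := (PySem.Int.mod ((rows : Int) + PySem.List.pyGetD U (k : Int) 0) m).toNat
        if pvGet2 DQ tgt (k + 1) > v then pvSet2 DQ tgt (k + 1) v else DQ) D) j k + 1)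
      (pvGet2 ((List.range j).foldl (fun DQ rows =>
        let v := pvGet2 DQ rows k
        let DQ := if pvGet2 DQ rows (k + 1) > v + 1 then pvSet2 DQ rows (k + 1) (v + 1) else DQ
        let tgt := (PySem.Int.mod ((rows : Int) + PySem.List.pyGetD U (k : Int) 0) m).toNat
        if pvGet2 DQ tgt (k + 1) > v then pvSet2 DQ tgt (k + 1) v else DQ) D) j k)
    refine ⟨s2, ?_, ?_⟩
    · intro r c hc
      rw [u2 r c hc, ihu r c hc]
    · intro r hr
      rw [w2 r]
      have hvj : pvGet2 ((List.range j).foldl (fun DQ rows =>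
          let v := pvGet2 DQ rows k
          let DQ := if pvGet2 DQ rows (k + 1) > v + 1 then pvSet2 DQ rows (k + 1) (v + 1) else DQ
          let tgt := (PySem.Int.mod ((rows : Int) + PySem.List.pyGetD U (k : Int) 0) m).toNat
          if pvGet2 DQ tgt (k + 1) > v then pvSet2 DQ tgt (k + 1) v else DQ) D) j k = v j := by
        rw [ihu j k (by omega), hcolk j hj']
      have hiff := pv_p_iff m hm (PySem.List.pyGetD U (k : Int) 0) r j hr hj'
      rw [hvj, ihv j hj', ihv r hr]
      exact pv_leaf r j
        ((PySem.Int.mod ((j : Int) + PySem.List.pyGetD U (k : Int) 0) m).toNat)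
        ((PySem.Int.mod ((j : Int) - PySem.List.pyGetD U (k : Int) 0) m).toNat)
        ((PySem.Int.mod ((r : Int) - PySem.List.pyGetD U (k : Int) 0) m).toNat)
        ((n : Int)) (v r) (v j)
        (v ((PySem.Int.mod ((j : Int) - PySem.List.pyGetD U (k : Int) 0) m).toNat))
        (v ((PySem.Int.mod ((r : Int) - PySem.List.pyGetD U (k : Int) 0) m).toNat))
        hiff
        (fun h => by subst h; exact ⟨rfl, rfl, rfl⟩)
        (fun h => congrArg v h)

-- the outer column loop of A against a forward rolling gather array, after k of the n iterations
theorem pv_outer_spec (m : Int) (hm : 1 ≤ m) (U : List Int) (k : Nat) (hk : k ≤ U.length) :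
    pvShape m.toNat U.length ((List.range k).foldl (fun DQ cols =>
        (List.range m.toNat).foldl (fun DQ rows =>
          let v := pvGet2 DQ rows cols
          let DQ := if pvGet2 DQ rows (cols + 1) > v + 1 then pvSet2 DQ rows (cols + 1) (v + 1) else DQ
          let tgt := (PySem.Int.mod ((rows : Int) + PySem.List.pyGetD U (cols : Int) 0) m).toNat
          if pvGet2 DQ tgt (cols + 1) > v then pvSet2 DQ tgt (cols + 1) v else DQ) DQ)
        (pvSet2 (List.replicate m.toNat (List.replicate (U.length + 1) (U.length : Int))) 0 0 0)) ∧
    (∀ r, r < m.toNat → pvGet2 ((List.range k).foldl (fun DQ cols =>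
        (List.range m.toNat).foldl (fun DQ rows =>
          let v := pvGet2 DQ rows cols
          let DQ := if pvGet2 DQ rows (cols + 1) > v + 1 then pvSet2 DQ rows (cols + 1) (v + 1) else DQ
          let tgt := (PySem.Int.mod ((rows : Int) + PySem.List.pyGetD U (cols : Int) 0) m).toNat
          if pvGet2 DQ tgt (cols + 1) > v then pvSet2 DQ tgt (cols + 1) v else DQ) DQ)
        (pvSet2 (List.replicate m.toNat (List.replicate (U.length + 1) (U.length : Int))) 0 0 0)) r k
      = ((U.take k).foldl (fun cur t =>
          (List.range m.toNat).map (fun r =>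
            min (min ((U.length : Int)) (cur.getD r 0 + 1))
              (cur.getD (PySem.Int.mod ((r : Int) - t) m).toNat 0)))
          ((List.replicate m.toNat ((U.length : Int))).set 0 0)).getD r 0) ∧
    (∀ r c, r < m.toNat → k < c → c ≤ U.length → pvGet2 ((List.range k).foldl (fun DQ cols =>
        (List.range m.toNat).foldl (fun DQ rows =>
          let v := pvGet2 DQ rows cols
          let DQ := if pvGet2 DQ rows (cols + 1) > v + 1 then pvSet2 DQ rows (cols + 1) (v + 1) else DQ
          let tgt := (PySem.Int.mod ((rows : Int) + PySem.List.pyGetD U (cols : Int) 0) m).toNat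
          if pvGet2 DQ tgt (cols + 1) > v then pvSet2 DQ tgt (cols + 1) v else DQ) DQ)
        (pvSet2 (List.replicate m.toNat (List.replicate (U.length + 1) (U.length : Int))) 0 0 0)) r c = (U.length : Int)) := by
  induction k with
  | zero =>
    have hM : 0 < m.toNat := by omega
    refine ⟨?_, ?_, ?_⟩
    · simp only [List.range_zero, List.foldl_nil]
      exact pvShape_pvSet2 (pv_shape_init m.toNat U.length ((U.length : Int))) 0 0 0 hM
    · intro r hr
      simp only [List.range_zero, List.foldl_nil, List.take_zero]
      rw [pvGet2_pvSet2 _ 0 0 0 r 0 (by simpa using hM) (by simp [hM]),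
        pv_c0_getD m.toNat U.length hM r hr]
      by_cases h : r = 0
      · subst h
        simp
      · rw [if_neg (show ¬(r = 0 ∧ (0 : Nat) = 0) from fun hh => h hh.1), if_neg h]
        exact pv_get2_replicate m.toNat U.length _ r 0 hr (by omega)
    · intro r c hr hc1 hc2
      simp only [List.range_zero, List.foldl_nil]
      rw [pvGet2_pvSet2 _ 0 0 0 r c (by simpa using hM) (by simp [hM])]
      rw [if_neg (show ¬(r = 0 ∧ c = 0) by omega)]
      exact pv_get2_replicate m.toNat U.length _ r c hr (by omega)
  | succ k ih =>
    have hk' : k < U.length := by omega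
    obtain ⟨ihs, ihb, ihc⟩ := ih (by omega)
    have hU : PySem.List.pyGetD U (k : Int) 0 = U[k] := by
      simp [List.getD, List.getElem?_eq_getElem hk']
    obtain ⟨s, u, w⟩ := pv_inner_spec m hm U U.length k hk'
      ((List.range k).foldl (fun DQ cols =>
        (List.range m.toNat).foldl (fun DQ rows =>
          let v := pvGet2 DQ rows cols
          let DQ := if pvGet2 DQ rows (cols + 1) > v + 1 then pvSet2 DQ rows (cols + 1) (v + 1) else DQ
          let tgt := (PySem.Int.mod ((rows : Int) + PySem.List.pyGetD U (cols : Int) 0) m).toNat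
          if pvGet2 DQ tgt (cols + 1) > v then pvSet2 DQ tgt (cols + 1) v else DQ) DQ)
        (pvSet2 (List.replicate m.toNat (List.replicate (U.length + 1) (U.length : Int))) 0 0 0))
      (fun r => (((U.take k).foldl (fun cur t =>
          (List.range m.toNat).map (fun r =>
            min (min ((U.length : Int)) (cur.getD r 0 + 1))
              (cur.getD (PySem.Int.mod ((r : Int) - t) m).toNat 0)))
          ((List.replicate m.toNat ((U.length : Int))).set 0 0)).getD r 0))
      ihs ihb (fun r hr => ihc r (k + 1) hr (by omega) (by omega))
      m.toNat le_rfl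
    rw [List.range_succ, List.foldl_append, List.foldl_cons, List.foldl_nil]
    refine ⟨s, ?_, ?_⟩
    · intro r hr
      rw [List.take_succ_eq_append_getElem hk', List.foldl_append, List.foldl_cons, List.foldl_nil]
      rw [w r hr]
      rw [pv_getD_map_range m.toNat _ r hr]
      rw [if_pos hr, if_pos (pv_p_lt m _ hm), hU]
      omega
    · intro r c hr hc1 hc2
      rw [u r c (by omega)]
      exact ihc r c hr (by omega) (by omega)


theorem findUniqueB_eq : findUniqueB = findUniqueA := rfl

-- ===== array/list bridges =====
def pvAbs (A : Array (Array Int)) : List (List Int) := A.toList.map Array.toList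

theorem avGet2_toList (A : Array (Array Int)) (r c : Nat) :
    avGet2 A r c = pvGet2 (pvAbs A) r c := by
  unfold avGet2 pvGet2 pvAbs
  rw [List.getElem?_map, Array.getElem?_toList]
  cases A[r]? with
  | none => simp
  | some row => simp [List.getD_eq_getElem?_getD, Array.getElem?_toList]

theorem avSet2_toList (A : Array (Array Int)) (r c : Nat) (v : Int) :
    pvAbs (avSet2 A r c v) = pvSet2 (pvAbs A) r c v := by
  unfold avSet2 pvSet2 pvAbs
  apply List.ext_getElem?
  intro i
  rw [List.getElem?_map, Array.getElem?_toList, Array.getElem?_modify,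
    List.getElem?_set, List.getElem?_map, Array.getElem?_toList, List.getElem?_map,
    Array.getElem?_toList]
  by_cases h : r = i
  · subst h
    by_cases hr : r < A.size
    · rw [Array.getElem?_eq_getElem hr]
      simp [Array.toList_setIfInBounds, hr]
    · rw [Array.getElem?_eq_none (by omega)]
      simp [hr]
  · simp [h]

theorem pv_condset_toList (A : Array (Array Int)) (r c : Nat) (w : Int) :
    pvAbs (if avGet2 A r c > w then avSet2 A r c w else A)
      = (if pvGet2 (pvAbs A) r c > w then pvSet2 (pvAbs A) r c w else pvAbs A) := by
  rw [avGet2_toList]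
  split_ifs
  · exact avSet2_toList A r c w
  · rfl

theorem pvAbs_init (M n : Nat) (x : Int) :
    pvAbs (Array.replicate M (Array.replicate (n + 1) x))
      = List.replicate M (List.replicate (n + 1) x) := by
  simp [pvAbs]

theorem pv_body_toList (m : Int) (U : List Int) (k : Nat) (A : Array (Array Int)) (rows : Nat) :
    pvAbs ((fun (DQ : Array (Array Int)) (rows : Nat) =>
        let v := avGet2 DQ rows k
        let DQ := if avGet2 DQ rows (k + 1) > v + 1 then avSet2 DQ rows (k + 1) (v + 1) else DQ
        let tgt := (PySem.Int.mod ((rows : Int) + PySem.List.pyGetD U (k : Int) 0) m).toNat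
        if avGet2 DQ tgt (k + 1) > v then avSet2 DQ tgt (k + 1) v else DQ) A rows)
      = (fun (DQ : List (List Int)) (rows : Nat) =>
        let v := pvGet2 DQ rows k
        let DQ := if pvGet2 DQ rows (k + 1) > v + 1 then pvSet2 DQ rows (k + 1) (v + 1) else DQ
        let tgt := (PySem.Int.mod ((rows : Int) + PySem.List.pyGetD U (k : Int) 0) m).toNat
        if pvGet2 DQ tgt (k + 1) > v then pvSet2 DQ tgt (k + 1) v else DQ) (pvAbs A) rows := by
  dsimp only
  rw [avGet2_toList A rows k]
  rw [pv_condset_toList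
    (if avGet2 A rows (k + 1) > pvGet2 (pvAbs A) rows k + 1
     then avSet2 A rows (k + 1) (pvGet2 (pvAbs A) rows k + 1) else A)
    ((PySem.Int.mod ((rows : Int) + PySem.List.pyGetD U (k : Int) 0) m).toNat) (k + 1)
    (pvGet2 (pvAbs A) rows k)]
  rw [pv_condset_toList A rows (k + 1) (pvGet2 (pvAbs A) rows k + 1)]

theorem pv_innerfold_toList (m : Int) (U : List Int) (k : Nat) (l : List Nat)
    (A : Array (Array Int)) :
    pvAbs (l.foldl (fun DQ rows =>
        let v := avGet2 DQ rows k
        let DQ := if avGet2 DQ rows (k + 1) > v + 1 then avSet2 DQ rows (k + 1) (v + 1) else DQ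
        let tgt := (PySem.Int.mod ((rows : Int) + PySem.List.pyGetD U (k : Int) 0) m).toNat
        if avGet2 DQ tgt (k + 1) > v then avSet2 DQ tgt (k + 1) v else DQ) A)
      = l.foldl (fun DQ rows =>
        let v := pvGet2 DQ rows k
        let DQ := if pvGet2 DQ rows (k + 1) > v + 1 then pvSet2 DQ rows (k + 1) (v + 1) else DQ
        let tgt := (PySem.Int.mod ((rows : Int) + PySem.List.pyGetD U (k : Int) 0) m).toNat
        if pvGet2 DQ tgt (k + 1) > v then pvSet2 DQ tgt (k + 1) v else DQ) (pvAbs A) := by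
  induction l generalizing A with
  | nil => rfl
  | cons x xs ih =>
    rw [List.foldl_cons, List.foldl_cons, ih, pv_body_toList m U k A x]

theorem pv_outerfold_toList (m : Int) (U : List Int) (l : List Nat) (A : Array (Array Int)) :
    pvAbs (l.foldl (fun DQ cols =>
        (List.range m.toNat).foldl (fun DQ rows =>
          let v := avGet2 DQ rows cols
          let DQ := if avGet2 DQ rows (cols + 1) > v + 1 then avSet2 DQ rows (cols + 1) (v + 1) else DQ
          let tgt := (PySem.Int.mod ((rows : Int) + PySem.List.pyGetD U (cols : Int) 0) m).toNat
          if avGet2 DQ tgt (cols + 1) > v then avSet2 DQ tgt (cols + 1) v else DQ) DQ) A)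
      = l.foldl (fun DQ cols =>
        (List.range m.toNat).foldl (fun DQ rows =>
          let v := pvGet2 DQ rows cols
          let DQ := if pvGet2 DQ rows (cols + 1) > v + 1 then pvSet2 DQ rows (cols + 1) (v + 1) else DQ
          let tgt := (PySem.Int.mod ((rows : Int) + PySem.List.pyGetD U (cols : Int) 0) m).toNat
          if pvGet2 DQ tgt (cols + 1) > v then pvSet2 DQ tgt (cols + 1) v else DQ) DQ) (pvAbs A) := by
  induction l generalizing A with
  | nil => rfl
  | cons x xs ih =>
    rw [List.foldl_cons, List.foldl_cons, ih, pv_innerfold_toList m U x (List.range m.toNat) A]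

-- ===== forward-fold ↔ backward-recursion bridge =====

-- min-fold over the residues 0..M-1 with a cap as the initial accumulator
def pvMinList (a : Int) (g : Nat → Int) (l : List Nat) : Int :=
  l.foldl (fun acc r => min acc (g r)) a

theorem le_pvMinList (a x : Int) (g : Nat → Int) (l : List Nat) :
    x ≤ pvMinList a g l ↔ x ≤ a ∧ ∀ r ∈ l, x ≤ g r := by
  induction l generalizing a with
  | nil => simp [pvMinList]
  | cons y ys ih =>
    simp only [pvMinList, List.foldl_cons] at *
    rw [ih (min a (g y))]
    simp only [le_min_iff, List.mem_cons]
    constructor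
    · rintro ⟨⟨h1, h2⟩, h3⟩
      exact ⟨h1, fun r hr => hr.elim (fun e => e ▸ h2) (h3 r)⟩
    · rintro ⟨h1, h2⟩
      exact ⟨⟨h1, h2 y (Or.inl rfl)⟩, fun r hr => h2 r (Or.inr hr)⟩

theorem pvMinList_le_init (a : Int) (g : Nat → Int) (l : List Nat) :
    pvMinList a g l ≤ a :=
  ((le_pvMinList a _ g l).mp le_rfl).1

theorem pvMinList_le_mem (a : Int) (g : Nat → Int) (l : List Nat) (r : Nat) (hr : r ∈ l) :
    pvMinList a g l ≤ g r :=
  ((le_pvMinList a _ g l).mp le_rfl).2 r hr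

-- Source B's f is nonnegative and bounded by all_trees (for all_trees ≥ 0)
theorem fB_nonneg (m n : Int) (hn : 0 ≤ n) (ts : List Int) (r : Int) :
    0 ≤ fB m n ts r := by
  induction ts generalizing r with
  | nil => by_cases h : r = 0 <;> simp [fB, h, hn]
  | cons t ts ih =>
    simp only [fB, le_min_iff]
    exact ⟨by have := ih r; omega, ih _⟩

theorem fB_le (m n : Int) (hn : 0 ≤ n) (ts : List Int) (r : Int) :
    fB m n ts r ≤ n := by
  induction ts generalizing r with
  | nil => by_cases h : r = 0 <;> simp [fB, h, hn]
  | cons t ts ih =>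
    simp only [fB]
    exact le_trans (min_le_right _ _) (ih _)

-- σ r = ((r - t) mod m), τ s = ((s + t) mod m) are inverse on [0, m): σ (τ s) = s
theorem pv_sigma_tau (m : Int) (hm : 1 ≤ m) (t : Int) (s : Nat) (hs : s < m.toNat) :
    (PySem.Int.mod (((PySem.Int.mod ((s : Int) + t) m).toNat : Int) - t) m).toNat = s :=
  (pv_p_iff m hm t (PySem.Int.mod ((s : Int) + t) m).toNat s (pv_p_lt m _ hm) hs).mpr rfl

theorem pv_tau_sigma (m : Int) (hm : 1 ≤ m) (t : Int) (r : Nat) (hr : r < m.toNat) :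
    (PySem.Int.mod (((PySem.Int.mod ((r : Int) - t) m).toNat : Int) + t) m).toNat = r :=
  (pv_p_iff m hm t r (PySem.Int.mod ((r : Int) - t) m).toNat hr (pv_p_lt m _ hm)).mp rfl

theorem pv_mod_cast (m : Int) (hm : 1 ≤ m) (x : Int) :
    (((PySem.Int.mod x m).toNat : Int)) = PySem.Int.mod x m := by
  have := PySem.Int.mod_nonneg x (b := m) (by omega)
  omega

-- the forward gather fold read at residue 0 equals the capped min over start residues r of
-- v[r] + fB(suffix, r)
theorem pv_bridge (m : Int) (hm : 1 ≤ m) (nI : Int) (hn : 0 ≤ nI) (U : List Int) :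
    ∀ v : List Int, v.length = m.toNat →
    (∀ r, r < m.toNat → 0 ≤ v.getD r 0 ∧ v.getD r 0 ≤ nI) →
    (U.foldl (fun cur t =>
        (List.range m.toNat).map (fun r =>
          min (min nI (cur.getD r 0 + 1))
            (cur.getD (PySem.Int.mod ((r : Int) - t) m).toNat 0))) v).getD 0 0
      = pvMinList nI (fun r => v.getD r 0 + fB m nI U (r : Int)) (List.range m.toNat) := by
  induction U with
  | nil =>
    intro v hlen hbd
    have h0M : 0 < m.toNat := by omega
    simp only [List.foldl_nil]
    apply le_antisymm
    · rw [le_pvMinList]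
      refine ⟨(hbd 0 h0M).2, fun r hr => ?_⟩
      have hrM : r < m.toNat := List.mem_range.mp hr
      by_cases h : r = 0
      · subst h
        simp [fB]
      · have : fB m nI ([] : List Int) (r : Int) = nI := by
          rw [show fB m nI ([] : List Int) (r : Int) = if (r : Int) = 0 then 0 else nI from rfl,
            if_neg (by exact_mod_cast h)]
        rw [this]
        have := (hbd r hrM).1
        have := (hbd 0 h0M).2
        omega
    · have := pvMinList_le_mem nI (fun r => v.getD r 0 + fB m nI ([] : List Int) (r : Int))
        (List.range m.toNat) 0 (List.mem_range.mpr h0M)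
      simpa [fB] using this
  | cons t U' ih =>
    intro v hlen hbd
    rw [List.foldl_cons]
    have hstep_len : ((List.range m.toNat).map (fun r =>
        min (min nI (v.getD r 0 + 1)) (v.getD (PySem.Int.mod ((r : Int) - t) m).toNat 0))).length
        = m.toNat := by simp
    have hstep_bd : ∀ r, r < m.toNat →
        0 ≤ ((List.range m.toNat).map (fun r =>
          min (min nI (v.getD r 0 + 1)) (v.getD (PySem.Int.mod ((r : Int) - t) m).toNat 0))).getD r 0
        ∧ ((List.range m.toNat).map (fun r =>
          min (min nI (v.getD r 0 + 1)) (v.getD (PySem.Int.mod ((r : Int) - t) m).toNat 0))).getD r 0 ≤ nI := by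
      intro r hr
      rw [pv_getD_map_range m.toNat _ r hr]
      have h1 := hbd r hr
      have h2 := hbd _ (pv_p_lt m ((r : Int) - t) hm)
      omega
    rw [ih _ hstep_len hstep_bd]
    -- both sides are capped minima over residues; compare them by le_antisymm
    have hbase : ∀ r, r < m.toNat →
        pvMinList nI (fun r => ((List.range m.toNat).map (fun r =>
          min (min nI (v.getD r 0 + 1)) (v.getD (PySem.Int.mod ((r : Int) - t) m).toNat 0))).getD r 0
          + fB m nI U' (r : Int)) (List.range m.toNat)
        ≤ min (min nI (v.getD r 0 + 1)) (v.getD (PySem.Int.mod ((r : Int) - t) m).toNat 0)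
          + fB m nI U' (r : Int) := by
      intro r hr
      have := pvMinList_le_mem nI (fun r => ((List.range m.toNat).map (fun r =>
          min (min nI (v.getD r 0 + 1)) (v.getD (PySem.Int.mod ((r : Int) - t) m).toNat 0))).getD r 0
          + fB m nI U' (r : Int)) (List.range m.toNat) r (List.mem_range.mpr hr)
      simpa only [pv_getD_map_range m.toNat _ r hr] using this
    apply le_antisymm
    · rw [le_pvMinList]
      refine ⟨pvMinList_le_init _ _ _, fun s hs => ?_⟩
      have hsM : s < m.toNat := List.mem_range.mp hs
      show _ ≤ v.getD s 0
        + min (1 + fB m nI U' (s : Int)) (fB m nI U' (PySem.Int.mod ((s : Int) + t) m))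
      rw [← min_add_add_left, le_min_iff]
      constructor
      · -- skip: ≤ v[s] + (1 + fB U' s)
        refine le_trans (hbase s hsM) ?_
        have h1 : min (min nI (v.getD s 0 + 1)) (v.getD (PySem.Int.mod ((s : Int) - t) m).toNat 0)
            ≤ v.getD s 0 + 1 := le_trans (min_le_left _ _) (min_le_right _ _)
        linarith
      · -- take: ≤ v[s] + fB U' ((s + t) mod m), via r = τ s
        have hτ : (PySem.Int.mod ((s : Int) + t) m).toNat < m.toNat := pv_p_lt m _ hm
        refine le_trans (hbase _ hτ) ?_
        rw [pv_sigma_tau m hm t s hsM, pv_mod_cast m hm ((s : Int) + t)]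
        have h1 : min (min nI (v.getD (PySem.Int.mod ((s : Int) + t) m).toNat 0 + 1)) (v.getD s 0)
            ≤ v.getD s 0 := min_le_right _ _
        linarith
    · rw [le_pvMinList]
      refine ⟨pvMinList_le_init _ _ _, fun r hrm => ?_⟩
      have hrM : r < m.toNat := List.mem_range.mp hrm
      rw [pv_getD_map_range m.toNat _ r hrM]
      have hY := fun s hsM => pvMinList_le_mem nI
        (fun s => v.getD s 0 + fB m nI (t :: U') (s : Int)) (List.range m.toNat) s
        (List.mem_range.mpr hsM)
      rw [← min_add_add_right, ← min_add_add_right, le_min_iff, le_min_iff]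
      have hunf : ∀ x : Int, fB m nI (t :: U') x
          = min (1 + fB m nI U' x) (fB m nI U' (PySem.Int.mod (x + t) m)) := fun x => rfl
      refine ⟨⟨?_, ?_⟩, ?_⟩
      · -- ≤ nI + fB U' r
        have h1 := pvMinList_le_init nI
          (fun s => v.getD s 0 + fB m nI (t :: U') (s : Int)) (List.range m.toNat)
        have h2 := fB_nonneg m nI hn U' (r : Int)
        linarith
      · -- ≤ (v[r]+1) + fB U' r
        have h1 := hY r hrM
        rw [hunf (r : Int)] at h1
        have h2 : min (1 + fB m nI U' (r : Int)) (fB m nI U' (PySem.Int.mod ((r : Int) + t) m))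
            ≤ 1 + fB m nI U' (r : Int) := min_le_left _ _
        linarith
      · -- ≤ v[σ r] + fB U' r, via s = σ r
        have hσ : (PySem.Int.mod ((r : Int) - t) m).toNat < m.toNat := pv_p_lt m _ hm
        have h1 := hY _ hσ
        rw [hunf (((PySem.Int.mod ((r : Int) - t) m).toNat : Int))] at h1
        have hback : PySem.Int.mod (((PySem.Int.mod ((r : Int) - t) m).toNat : Int) + t) m
            = (r : Int) := by
          have h2 := pv_tau_sigma m hm t r hrM
          have h3 := PySem.Int.mod_nonneg
            ((((PySem.Int.mod ((r : Int) - t) m).toNat : Int)) + t) (b := m) (by omega)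
          omega
        rw [hback] at h1
        have h2 : min (1 + fB m nI U' (((PySem.Int.mod ((r : Int) - t) m).toNat : Int)))
            (fB m nI U' (r : Int)) ≤ fB m nI U' (r : Int) := min_le_right _ _
        linarith

-- the capped min over start residues at the initial vector collapses to fB at residue 0
theorem pv_final (m : Int) (hm : 1 ≤ m) (U : List Int) :
    pvMinList ((U.length : Int))
      (fun r => ((List.replicate m.toNat ((U.length : Int))).set 0 0).getD r 0
        + fB m ((U.length : Int)) U (r : Int)) (List.range m.toNat)
      = fB m ((U.length : Int)) U 0 := by
  have h0M : 0 < m.toNat := by omega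
  have hn : (0 : Int) ≤ (U.length : Int) := by positivity
  apply le_antisymm
  · have := pvMinList_le_mem ((U.length : Int))
      (fun r => ((List.replicate m.toNat ((U.length : Int))).set 0 0).getD r 0
        + fB m ((U.length : Int)) U (r : Int)) (List.range m.toNat) 0 (List.mem_range.mpr h0M)
    simp only at this
    rw [pv_c0_getD m.toNat U.length h0M 0 h0M] at this
    simpa using this
  · rw [le_pvMinList]
    refine ⟨fB_le m _ hn U 0, fun r hrm => ?_⟩
    have hrM : r < m.toNat := List.mem_range.mp hrm
    rw [pv_c0_getD m.toNat U.length h0M r hrM]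
    by_cases h : r = 0
    · subst h; simp
    · rw [if_neg h]
      have := fB_le m _ hn U 0
      have := fB_nonneg m _ hn U (r : Int)
      omega

-- ===== VERDICT (by name: the statement is the Claim_ definition above) =====
theorem orchard_spec : Claim_equal_orchard := by
  intro T m _hdom hpre
  have hm : (1 : Int) ≤ m := hpre
  unfold Spec_orchard
  simp only [orchard, orchard_alt, findUniqueB_eq, PySem.List.len_eq]
  rw [avGet2_toList, pv_outerfold_toList, avSet2_toList, pvAbs_init]
  have h := pv_outer_spec m hm (findUniqueA (PySem.List.sorted T (fun x => x)) m)
    (findUniqueA (PySem.List.sorted T (fun x => x)) m).length le_rfl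
  have h0 : 0 < m.toNat := by omega
  have hcol := h.2.1 0 h0
  rw [List.take_length] at hcol
  rw [hcol]
  rw [pv_bridge m hm ((findUniqueA (PySem.List.sorted T (fun x => x)) m).length : Int)
    (by positivity) (findUniqueA (PySem.List.sorted T (fun x => x)) m)
    _ (by simp)
    (by
      intro r hr
      rw [pv_c0_getD m.toNat _ h0 r hr]
      by_cases hzr : r = 0
      · subst hzr; simp
      · rw [if_neg hzr]
        constructor
        · positivity
        · exact le_refl _)]
  exact pv_final m hm (findUniqueA (PySem.List.sorted T (fun x => x)) m)
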